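-- pv_equiv track=rewrite | github.com/adiffloth/adventofcode_20 | day16/scratch.py | rule_match
-- ===== SOURCE A (Python) =====
-- def rule_match(list_i):
--     matched_rules = set()
--     if type(list_i) == int:
--         list_i = [list_i]
--     for i in list_i:
--         for rule_id, rule in rules.items():
--             for rng in rule:
--                 matched_rules.add(rule_id) if i in rng else False
--     return matched_rules
--
-- rules = {
--     0: [range(0, 2), range(4, 20)],
--     1: [range(0, 6), range(8, 20)],
--     2: [range(0, 14), range(16, 20)]
-- }
-- ===== SOURCE B (Python) =====
-- rules = {
--     0: [range(0, 2), range(4, 20)],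
--     1: [range(0, 6), range(8, 20)],
--     2: [range(0, 14), range(16, 20)]
-- }
--
-- # inverted index: value -> set of rule ids whose ranges contain it, built once
-- INDEX = {}
-- for _rule_id, _rule in rules.items():
--     for _rng in _rule:
--         for _v in _rng:
--             INDEX.setdefault(_v, set()).add(_rule_id)
--
-- def rule_match(list_i):
--     if type(list_i) == int:
--         list_i = [list_i]
--     matched_rules = set()
--     for i in list_i:
--         matched_rules |= INDEX.get(i, set())
--     return matched_rules
-- ===== Notes on version B (the rewrite author's own statement) =====
-- stated objective: faster
-- what changed: B precomputes an inverted index from value to the set of rule ids whose ranges contain it (built once from rules), then makes a single pass over list_i unioning index lookups, instead of rescanning every rule's every range for each input value.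
import Mathlib
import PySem

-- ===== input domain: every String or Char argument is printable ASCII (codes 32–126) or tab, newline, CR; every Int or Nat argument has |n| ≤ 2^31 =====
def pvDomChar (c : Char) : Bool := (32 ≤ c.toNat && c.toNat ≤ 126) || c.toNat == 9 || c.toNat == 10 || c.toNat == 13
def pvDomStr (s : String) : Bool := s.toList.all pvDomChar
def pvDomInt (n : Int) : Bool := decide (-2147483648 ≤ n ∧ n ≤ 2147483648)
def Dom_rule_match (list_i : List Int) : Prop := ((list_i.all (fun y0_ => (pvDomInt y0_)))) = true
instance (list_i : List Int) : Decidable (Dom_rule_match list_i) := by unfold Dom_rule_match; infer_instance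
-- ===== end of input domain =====

-- B replaces A's per-value rescan of every rule's ranges by an inverted index (value -> rule ids)
-- built once from `rules`, so the main pass does one lookup per input value.
-- The argument is a List Int here, so Python's `type(list_i) == int` wrapping branch is vacuous in both ports.

-- ===== PORT A =====
-- the module constant `rules`; each range(a, b) is ported as the pair (a, b)
def pvRules : List (Int × List (Int × Int)) :=
  [(0, [(0, 2), (4, 20)]), (1, [(0, 6), (8, 20)]), (2, [(0, 14), (16, 20)])]

-- `i in range(a, b)` is Python's O(1) membership test a ≤ i < b (exact for step-1 ranges)
def rule_match (list_i : List Int) : List Int :=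
  list_i.foldl (fun matched_rules i =>
    pvRules.foldl (fun m p =>
      p.2.foldl (fun m rng =>
        if rng.1 ≤ i ∧ i < rng.2 then PySem.Set.add m p.1 else m) m) matched_rules) []

-- ===== PORT B =====
-- the module constant INDEX, built once by iterating rules / ranges / range values
def pvIndex : PySem.Dict Int (List Int) :=
  pvRules.foldl (fun d p =>
    p.2.foldl (fun d rng =>
      (PySem.List.pyRange rng.1 rng.2 1).foldl (fun d v =>
        d.insert v (PySem.Set.add (d.getD v []) p.1)) d) d) PySem.Dict.empty

def rule_match_alt (list_i : List Int) : List Int :=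
  list_i.foldl (fun matched_rules i =>
    (pvIndex.getD i []).foldl PySem.Set.add matched_rules) []

-- ===== PRECONDITION & SPEC =====
def Spec_rule_match (list_i : List Int) (out : List Int) : Prop := out = rule_match_alt list_i
instance (list_i : List Int) (out : List Int) : Decidable (Spec_rule_match list_i out) := by unfold Spec_rule_match; infer_instance

-- ===== CLAIM (what is proved, stated in full; the proofs are below) =====
def Claim_equal_rule_match : Prop := ∀ (list_i : List Int), Dom_rule_match list_i → Spec_rule_match list_i (rule_match list_i)

-- ===== LEMMAS AND PROOFS =====

-- values outside every rule's ranges have no entry in the index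
set_option maxRecDepth 20000 in
theorem pvIndex_getD_out (i : Int) (h : ¬(0 ≤ i ∧ i < 20)) : pvIndex.getD i [] = [] := by
  have hI : pvIndex = PySem.Dict.mk [(0, [0, 1, 2]), (1, [0, 1, 2]), (4, [0, 1, 2]), (5, [0, 1, 2]),
      (6, [0, 2]), (7, [0, 2]), (8, [0, 1, 2]), (9, [0, 1, 2]), (10, [0, 1, 2]), (11, [0, 1, 2]),
      (12, [0, 1, 2]), (13, [0, 1, 2]), (14, [0, 1]), (15, [0, 1]), (16, [0, 1, 2]),
      (17, [0, 1, 2]), (18, [0, 1, 2]), (19, [0, 1, 2]), (2, [1, 2]), (3, [1, 2])] := by decide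
  have hc : pvIndex.contains i = false := by
    rw [hI, PySem.Dict.contains_eq_decide_mem_keys]
    simp only [PySem.Dict.keys_mk, List.map_cons, List.map_nil, decide_eq_false_iff_not]
    intro hmem
    simp only [List.mem_cons, List.not_mem_nil, or_false] at hmem
    omega
  exact PySem.Dict.getD_of_not_contains _ _ hc

-- A's per-value step (scan every rule's ranges) equals B's per-value step (index lookup)
set_option maxRecDepth 8000 in
theorem pv_step_eq (i : Int) (m : List Int) :
    pvRules.foldl (fun m p =>
      p.2.foldl (fun m rng =>
        if rng.1 ≤ i ∧ i < rng.2 then PySem.Set.add m p.1 else m) m) m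
    = (pvIndex.getD i []).foldl PySem.Set.add m := by
  by_cases h : 0 ≤ i ∧ i < 20
  · obtain ⟨h1, h2⟩ := h
    interval_cases i <;> rfl
  · rw [pvIndex_getD_out i h]
    simp only [pvRules, List.foldl_cons, List.foldl_nil]
    split_ifs <;> first | rfl | omega

-- ===== VERDICT (by name: the statement is the Claim_ definition above) =====
theorem rule_match_spec : Claim_equal_rule_match := by
  intro list_i hD
  clear hD
  unfold Spec_rule_match rule_match rule_match_alt
  suffices h : ∀ acc : List Int,
      list_i.foldl (fun matched_rules i =>
        pvRules.foldl (fun m p =>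
          p.2.foldl (fun m rng =>
            if rng.1 ≤ i ∧ i < rng.2 then PySem.Set.add m p.1 else m) m) matched_rules) acc
      = list_i.foldl (fun matched_rules i =>
        (pvIndex.getD i []).foldl PySem.Set.add matched_rules) acc by
    exact h []
  induction list_i with
  | nil => intro acc; simp only [List.foldl_nil]
  | cons x xs ih =>
    intro acc
    rw [List.foldl_cons, List.foldl_cons, pv_step_eq]
    apply ih
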